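-- pv_equiv track=rewrite | github.com/Facundo-Barbera/cripto-5to | analyzer/generator.py | _get_zone_hierarchy
-- ===== SOURCE A (Python) =====
-- from typing import Dict, List, Any, Optional
--
-- def _get_zone_hierarchy(domain: str) -> List[str]:
--     parts = domain.rstrip('.').split('.')
--     hierarchy = []
--     for i in range(len(parts)):
--         zone = '.'.join(parts[i:])
--         hierarchy.append(zone)
--     hierarchy.append('.')
--     return hierarchy
-- ===== SOURCE B (Python) =====
-- from typing import List
--
--
-- def _get_zone_hierarchy(domain: str) -> List[str]:
--     parts = domain.rstrip('.').split('.')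
--     out = []
--     suffix = ''
--     for part in reversed(parts):
--         suffix = part if not out else part + '.' + suffix
--         out.append(suffix)
--     out.reverse()
--     out.append('.')
--     return out
-- ===== Notes on version B (the rewrite author's own statement) =====
-- stated objective: alternative
-- what changed: Instead of re-joining the slice parts[i:] for every index, B walks the labels once from the back, extending one running suffix string per label, then reverses the collected list and appends the final root-zone entry.
import Mathlib
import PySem

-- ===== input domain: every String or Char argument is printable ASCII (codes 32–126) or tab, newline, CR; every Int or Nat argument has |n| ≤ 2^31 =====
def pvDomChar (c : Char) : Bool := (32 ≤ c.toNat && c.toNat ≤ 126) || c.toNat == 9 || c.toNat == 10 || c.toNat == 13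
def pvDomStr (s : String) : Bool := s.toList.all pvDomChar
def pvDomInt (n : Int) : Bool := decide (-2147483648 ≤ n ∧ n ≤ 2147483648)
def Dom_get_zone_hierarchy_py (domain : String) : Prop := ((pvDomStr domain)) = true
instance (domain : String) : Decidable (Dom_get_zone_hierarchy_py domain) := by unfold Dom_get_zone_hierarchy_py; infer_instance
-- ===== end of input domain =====

-- B replaces A's per-index re-join of parts[i:] with a single back-to-front pass that extends
-- one running suffix per label (objective: alternative decomposition; not measurably faster).

-- shared helper: exact port of Python's `s.rstrip('.')` — remove trailing '.' characters
-- (PySem has stripChars for both-sided strip only, so this is ported by hand; it is exact: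
-- rstrip(chars) removes exactly the maximal trailing run of characters from the set).
def pvRstripDots (cs : List Char) : List Char :=
  (cs.reverse.dropWhile (fun c => c == '.')).reverse

-- ===== PORT A =====
def get_zone_hierarchy_py (domain : String) : List String :=
  let parts := PySem.Chars.splitOn (pvRstripDots domain.toList) ['.']
  let hierarchy := (PySem.List.pyRange 0 (parts.length : Int) 1).foldl
    (fun h i => h ++ [String.ofList (PySem.Chars.join ['.'] (PySem.List.slice parts (some i) none))])
    ([] : List String)
  hierarchy ++ ["."]

-- ===== PORT B =====
def get_zone_hierarchy_py_alt (domain : String) : List String :=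
  let parts := PySem.Chars.splitOn (pvRstripDots domain.toList) ['.']
  let st := parts.reverse.foldl
    (fun (st : List String × List Char) part =>
      let suffix := if st.1.isEmpty then part else part ++ '.' :: st.2
      (st.1 ++ [String.ofList suffix], suffix))
    (([] : List String), ([] : List Char))
  st.1.reverse ++ ["."]

-- ===== PRECONDITION & SPEC =====
def Spec_get_zone_hierarchy_py (domain : String) (out : List String) : Prop := out = get_zone_hierarchy_py_alt domain
instance (domain : String) (out : List String) : Decidable (Spec_get_zone_hierarchy_py domain out) := by unfold Spec_get_zone_hierarchy_py; infer_instance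

-- ===== CLAIM (what is proved, stated in full; the proofs are below) =====
def Claim_equal_get_zone_hierarchy_py : Prop := ∀ (domain : String), Dom_get_zone_hierarchy_py domain → Spec_get_zone_hierarchy_py domain (get_zone_hierarchy_py domain)

-- ===== LEMMAS AND PROOFS =====

-- the list of dot-joined suffixes of l, longest first (the common value of both loops)
def pvSuffixes (l : List (List Char)) : List String :=
  match l with
  | [] => []
  | p :: ps => String.ofList (PySem.Chars.join ['.'] (p :: ps)) :: pvSuffixes ps

theorem pvFoldlPush {α β : Type} (f : α → β) (xs : List α) (init : List β) :
    xs.foldl (fun h x => h ++ [f x]) init = init ++ xs.map f := by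
  induction xs generalizing init with
  | nil => simp
  | cons x xs ih => simp [List.foldl_cons, ih]

theorem pvMapRangeDrop (l : List (List Char)) :
    (List.range l.length).map (fun k => String.ofList (PySem.Chars.join ['.'] (l.drop k)))
      = pvSuffixes l := by
  induction l with
  | nil => simp [pvSuffixes]
  | cons p ps ih =>
    rw [List.length_cons, List.range_succ_eq_map, List.map_cons, List.map_map]
    simp only [Function.comp_def, List.drop_succ_cons, List.drop_zero]
    rw [ih]
    rfl

theorem pvJoinConsCons (p : List Char) (ps : List (List Char)) (h : ps ≠ []) :
    PySem.Chars.join ['.'] (p :: ps) = p ++ '.' :: PySem.Chars.join ['.'] ps := by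
  cases ps with
  | nil => exact absurd rfl h
  | cons q qs => rw [PySem.Chars.join_cons_cons]; simp

theorem pvFoldB (l : List (List Char)) :
    l.reverse.foldl
      (fun (st : List String × List Char) part =>
        let suffix := if st.1.isEmpty then part else part ++ '.' :: st.2
        (st.1 ++ [String.ofList suffix], suffix))
      (([] : List String), ([] : List Char))
      = ((pvSuffixes l).reverse, PySem.Chars.join ['.'] l) := by
  induction l with
  | nil => simp [pvSuffixes, PySem.Chars.join_nil]
  | cons p ps ih =>
    rw [List.reverse_cons, List.foldl_append, ih]
    cases ps with
    | nil =>
      simp [pvSuffixes, PySem.Chars.join_singleton]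
    | cons q qs =>
      have hne : (pvSuffixes (q :: qs)).reverse ≠ [] := by
        simp [pvSuffixes]
      simp only [List.foldl_cons, List.foldl_nil]
      rw [if_neg (by simpa [List.isEmpty_iff] using hne)]
      rw [← pvJoinConsCons p (q :: qs) (by simp)]
      simp [pvSuffixes]

theorem pvSideA (l : List (List Char)) :
    (PySem.List.pyRange 0 (l.length : Int) 1).foldl
      (fun h i => h ++ [String.ofList (PySem.Chars.join ['.'] (PySem.List.slice l (some i) none))])
      ([] : List String) = pvSuffixes l := by
  rw [pvFoldlPush]
  rw [PySem.List.pyRange_zero_nat, List.map_map]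
  rw [List.nil_append, ← pvMapRangeDrop l]
  apply List.map_congr_left
  intro k _
  simp [Function.comp, PySem.List.slice_from_natCast]

-- ===== VERDICT (by name: the statement is the Claim_ definition above) =====
theorem get_zone_hierarchy_py_spec : Claim_equal_get_zone_hierarchy_py := by
  intro domain _
  unfold Spec_get_zone_hierarchy_py get_zone_hierarchy_py get_zone_hierarchy_py_alt
  dsimp only
  rw [pvSideA, pvFoldB]
  simp
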